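-- pv_equiv track=rewrite | github.com/constantin-catalina/network-automation | python_scripts/role_filter.py | filter_devices
-- ===== SOURCE A (Python) =====
-- ROLES = {
--     "router": {"vlan", "routing", "acl", "ipv6", "dhcp", "nat", "save", "backup", "compare", "ping"},
--     "switch": {"vlan", "acl", "ipv6", "save", "backup", "compare", "ping"},
--     "msw":    {"vlan", "routing", "acl", "ipv6", "save", "backup", "compare", "ping"},
--     "host":   {"ping"}
--     }
--
-- BASELINE = {"ping"}
--
-- def get_role(devices_data, name):
--       conn = (devices_data.get(name) or {})
--       return (conn.get("role") or "").lower()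
--
-- def get_caps(devices_data, name):
--       role = get_role(devices_data, name)
--       caps = set()
--       if role in ROLES:
--             caps |= ROLES[role]
--       return caps | BASELINE
--
-- def filter_devices(devices_data, required_cap=None, roles=None):
--       out = []
--       role_filter = {r.lower() for r in roles} if roles else None
--
--       for name in devices_data.keys():
--             role = get_role(devices_data, name)
--             if role_filter and role not in role_filter:
--                   continue
--
--             caps = get_caps(devices_data, name)
--             if required_cap and required_cap not in caps:
--                   continue
--             out.append(name)
--
--       return out
-- ===== SOURCE B (Python) =====
-- ROLES = {
--     "router": {"vlan", "routing", "acl", "ipv6", "dhcp", "nat", "save", "backup", "compare", "ping"},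
--     "switch": {"vlan", "acl", "ipv6", "save", "backup", "compare", "ping"},
--     "msw":    {"vlan", "routing", "acl", "ipv6", "save", "backup", "compare", "ping"},
--     "host":   {"ping"}
--     }
--
-- BASELINE = {"ping"}
--
--
-- def filter_devices(devices_data, required_cap=None, roles=None):
--     wanted = {r.lower() for r in roles} if roles else None
--     # a role outside ROLES has only the baseline caps
--     cap_free = not required_cap or required_cap in BASELINE
--     # known roles (from the static table) that pass both filters
--     ok_known = {r for r, caps in ROLES.items()
--                 if (wanted is None or r in wanted)
--                 and (cap_free or required_cap in caps)}
--     out = []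
--     for name, conn in devices_data.items():
--         role = ((conn or {}).get("role") or "").lower()
--         if role in ok_known or (role not in ROLES and cap_free
--                                 and (wanted is None or role in wanted)):
--             out.append(name)
--     return out
-- ===== Notes on version B (the rewrite author's own statement) =====
-- stated objective: alternative
-- what changed: B precomputes a qualifying-role table (cap_free flag plus the set of static ROLES entries passing both filters) and then does one pass over devices_data.items() testing role membership, instead of A's per-device name re-lookup and per-device capability-set construction (get_role/get_caps with set unions).
import Mathlib
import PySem

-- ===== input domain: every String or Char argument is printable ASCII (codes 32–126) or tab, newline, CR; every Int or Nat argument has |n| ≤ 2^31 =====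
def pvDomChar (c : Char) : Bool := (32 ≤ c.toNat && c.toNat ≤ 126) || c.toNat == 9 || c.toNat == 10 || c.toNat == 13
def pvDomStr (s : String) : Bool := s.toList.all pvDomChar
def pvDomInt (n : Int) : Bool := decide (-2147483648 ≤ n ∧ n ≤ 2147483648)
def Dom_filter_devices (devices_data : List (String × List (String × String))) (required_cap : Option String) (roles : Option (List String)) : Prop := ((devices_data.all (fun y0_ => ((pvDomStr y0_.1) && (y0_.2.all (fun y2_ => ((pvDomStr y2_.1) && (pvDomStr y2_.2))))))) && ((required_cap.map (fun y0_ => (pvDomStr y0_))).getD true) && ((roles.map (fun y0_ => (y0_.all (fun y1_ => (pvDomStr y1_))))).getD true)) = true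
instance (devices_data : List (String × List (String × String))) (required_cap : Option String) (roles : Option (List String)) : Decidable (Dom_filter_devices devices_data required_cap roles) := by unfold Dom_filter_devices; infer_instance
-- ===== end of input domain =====

-- B replaces A's per-device name re-lookup and capability-set construction by a precomputed
-- qualifying-role table plus one pass over the items (objective: alternative decomposition).
-- ===== PORT A =====
def pvROLES : List (String × PySem.Set String) :=
  [("router", PySem.Set.ofList ["vlan","routing","acl","ipv6","dhcp","nat","save","backup","compare","ping"]),
   ("switch", PySem.Set.ofList ["vlan","acl","ipv6","save","backup","compare","ping"]),
   ("msw",    PySem.Set.ofList ["vlan","routing","acl","ipv6","save","backup","compare","ping"]),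
   ("host",   PySem.Set.ofList ["ping"])]

def pvBASELINE : PySem.Set String := PySem.Set.ofList ["ping"]

-- conn = (devices_data.get(name) or {}); return (conn.get("role") or "").lower()
def pvGetRole (devices_data : List (String × List (String × String))) (name : String) : String :=
  let conn := ((devices_data.find? (fun p => p.1 == name)).map (fun p => p.2)).getD []
  PySem.Str.lower (((conn.find? (fun q => q.1 == "role")).map (fun q => q.2)).getD "")

def pvGetCaps (devices_data : List (String × List (String × String))) (name : String) : PySem.Set String :=
  let role := pvGetRole devices_data name
  let caps : PySem.Set String := PySem.Set.empty
  let caps := match pvROLES.find? (fun rc => rc.1 == role) with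
    | some rc => PySem.Set.union caps rc.2
    | none => caps
  PySem.Set.union caps pvBASELINE

def filter_devices (devices_data : List (String × List (String × String))) (required_cap : Option String) (roles : Option (List String)) : List String :=
  let roleFilter : Option (PySem.Set String) :=
    match roles with
    | some rs => if rs.isEmpty then none else some (PySem.Set.ofList (rs.map PySem.Str.lower))
    | none => none
  devices_data.foldl (fun out p =>
    let role := pvGetRole devices_data p.1
    if (match roleFilter with
        | some rf => !(PySem.Set.contains rf role)
        | none => false) then out
    else
      let caps := pvGetCaps devices_data p.1
      if (match required_cap with
          | some c => !(c == "") && !(PySem.Set.contains caps c)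
          | none => false) then out
      else out ++ [p.1]) []

-- ===== PORT B =====
def filter_devices_alt (devices_data : List (String × List (String × String))) (required_cap : Option String) (roles : Option (List String)) : List String :=
  let wanted : Option (PySem.Set String) :=
    match roles with
    | some rs => if rs.isEmpty then none else some (PySem.Set.ofList (rs.map PySem.Str.lower))
    | none => none
  let capFree : Bool :=
    match required_cap with
    | none => true
    | some c => c == "" || PySem.Set.contains pvBASELINE c
  let okKnown : PySem.Set String :=
    PySem.Set.ofList ((pvROLES.filter (fun rc =>
      (match wanted with | none => true | some w => PySem.Set.contains w rc.1) &&
      (capFree || (match required_cap with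
                   | none => false
                   | some c => PySem.Set.contains rc.2 c)))).map (fun rc => rc.1))
  devices_data.foldl (fun out p =>
    let role := PySem.Str.lower (((p.2.find? (fun q => q.1 == "role")).map (fun q => q.2)).getD "")
    if PySem.Set.contains okKnown role ||
       (!(pvROLES.any (fun rc => rc.1 == role)) && capFree &&
        (match wanted with | none => true | some w => PySem.Set.contains w role))
    then out ++ [p.1] else out) []

-- ===== PRECONDITION & SPEC =====
-- Pre_ excludes association lists with duplicate keys (outer device names or keys inside one
-- device's dict): such lists do not represent a Python dict faithfully, so any reading of them
-- is accidental.
def Pre_filter_devices (devices_data : List (String × List (String × String))) (required_cap : Option String) (roles : Option (List String)) : Prop :=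
  (devices_data.map Prod.fst).Nodup ∧ ∀ p ∈ devices_data, (p.2.map Prod.fst).Nodup
instance (devices_data : List (String × List (String × String))) (required_cap : Option String) (roles : Option (List String)) : Decidable (Pre_filter_devices devices_data required_cap roles) := by unfold Pre_filter_devices; infer_instance
def pvWitness_filter_devices : (List (String × List (String × String))) × Option String × Option (List String) :=
  ([("r1", [("role", "Router")]), ("h1", [("role", "host")])], some "nat", none)

def Spec_filter_devices (devices_data : List (String × List (String × String))) (required_cap : Option String) (roles : Option (List String)) (out : List String) : Prop := out = filter_devices_alt devices_data required_cap roles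
instance (devices_data : List (String × List (String × String))) (required_cap : Option String) (roles : Option (List String)) (out : List String) : Decidable (Spec_filter_devices devices_data required_cap roles out) := by unfold Spec_filter_devices; infer_instance

-- ===== CLAIM (what is proved, stated in full; the proofs are below) =====
def Claim_equal_filter_devices : Prop := ∀ (devices_data : List (String × List (String × String))) (required_cap : Option String) (roles : Option (List String)), Dom_filter_devices devices_data required_cap roles → Pre_filter_devices devices_data required_cap roles → Spec_filter_devices devices_data required_cap roles (filter_devices devices_data required_cap roles)

-- ===== LEMMAS AND PROOFS =====

-- with distinct keys, looking a member's own key up finds that member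
theorem pv_find?_fst_self {α : Type} (l : List (String × α)) (p : String × α)
    (hp : p ∈ l) (hnd : (l.map Prod.fst).Nodup) :
    l.find? (fun q => q.1 == p.1) = some p := by
  induction l with
  | nil => cases hp
  | cons a t ih =>
    simp only [List.map_cons, List.nodup_cons] at hnd
    rcases List.mem_cons.mp hp with h | h
    · subst h; simp [List.find?]
    · have hne : a.1 ≠ p.1 := fun he => hnd.1 (he ▸ List.mem_map_of_mem h)
      simp only [List.find?]
      rw [show (a.1 == p.1) = false by simpa using hne]
      exact ih h hnd.2

theorem pv_keep_eq (rc : Option String) (w : Option (PySem.Set String)) (role : String) :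
  ((!(match w with | some rf => !rf.contains role | none => false)) &&
   !(match rc with
     | some c => !(c == "") && !(((match List.find? (fun e : String × PySem.Set String => e.1 == role) pvROLES with
          | some e => PySem.Set.empty.union e.2
          | none => PySem.Set.empty).union pvBASELINE).contains c)
     | none => false))
  = (((PySem.Set.ofList (List.map (fun e => e.1) (List.filter (fun e =>
        (match w with | none => true | some w' => w'.contains e.1) &&
        ((match rc with | none => true | some c => c == "" || pvBASELINE.contains c) ||
         (match rc with | none => false | some c => e.2.contains c))) pvROLES))).contains role) ||
     ((!(pvROLES.any fun e => e.1 == role)) &&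
      (match rc with | none => true | some c => c == "" || pvBASELINE.contains c) &&
      (match w with | none => true | some w' => w'.contains role))) := by
  rcases hf : List.find? (fun e : String × PySem.Set String => e.1 == role) pvROLES with _ | e
  · have hnone := List.find?_eq_none.mp hf
    have hany : (pvROLES.any fun e => e.1 == role) = false := by
      simp only [List.any_eq_false]; exact fun e he => by simpa using hnone e he
    have hok : ∀ q, (PySem.Set.ofList
        (List.map (fun e : String × PySem.Set String => e.1) (List.filter q pvROLES))).contains role = false := by
      intro q
      rw [Bool.eq_false_iff]
      intro hcon
      have : role ∈ List.map (fun e : String × PySem.Set String => e.1) (List.filter q pvROLES) := by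
        simpa [PySem.Set.mem_ofList] using (PySem.Set.contains_iff _ _).mp hcon
      rcases List.mem_map.mp this with ⟨e, he, hrole⟩
      exact hnone e (List.mem_of_mem_filter he) (by simp [hrole])
    rw [hok, hany]
    have hbase : (PySem.Set.empty.union pvBASELINE) = pvBASELINE := by decide
    rw [hbase]
    rcases rc with _ | c <;> rcases w with _ | ws <;> simp [pvBASELINE, Bool.and_comm]
  · have hkey : e.1 = role := by simpa using List.find?_some hf
    subst hkey
    have hmem := List.mem_of_find?_eq_some hf
    have hany : (pvROLES.any fun x => x.1 == e.1) = true :=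
      List.any_eq_true.mpr ⟨e, hmem, by simp⟩
    rw [hany]
    simp only [pvROLES, List.mem_cons, List.not_mem_nil, or_false] at hmem
    rcases hmem with rfl | rfl | rfl | rfl <;>
      rcases rc with _ | c <;> rcases w with _ | ws <;>
        rw [Bool.eq_iff_iff] <;>
        simp [pvROLES, pvBASELINE, List.mem_filter, PySem.Set.mem_ofList] <;>
        tauto

theorem filter_devices_spec : Claim_equal_filter_devices := by
  intro dd rc rl _hdom hpre
  unfold Spec_filter_devices
  unfold filter_devices filter_devices_alt
  apply PySem.List.foldl_congr_mem'
  intro p hp out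
  unfold pvGetCaps pvGetRole
  rw [pv_find?_fst_self dd p hp hpre.1]
  simp only [Option.map_some, Option.getD_some]
  generalize (match rl with
    | some rs => if rs.isEmpty = true then none else some (PySem.Set.ofList (List.map PySem.Str.lower rs))
    | none => none) = w
  have hshape : ∀ (a b c : Bool), ((!a && !b) = c) →
      (if a = true then out else if b = true then out else out ++ [p.1]) =
      (if c = true then out ++ [p.1] else out) := by
    intro a b c h; cases a <;> cases b <;> cases c <;> simp_all
  apply hshape
  exact pv_keep_eq rc w _
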